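-- pv_equiv track=rewrite | github.com/kordaniel/data-structures | python/sardinas-patterson-algorithm/is-uniquely-decodable.py | generate_cn
-- ===== SOURCE A (Python) =====
-- def generate_cn(c, n):
--     if n == 0:
--         return set(c)
--
--     cn = set()
--     cn_minus_1 = generate_cn(c, n-1)
--
--     for u in c:
--         for v in cn_minus_1:
--             if (len(u) > len(v)) and u.find(v) == 0:
--                 cn.add(u[len(v):])
--
--     for u in cn_minus_1:
--         for v in c:
--             if (len(u) > len(v)) and u.find(v) == 0:
--                 cn.add(u[len(v):])
--
--     return cn
-- ===== SOURCE B (Python) =====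
-- def _dangling(xs, ys):
--     """Dangling suffixes u[len(v):] for every u in xs with a proper prefix v in ys."""
--     return {u[len(v):] for u in xs for v in ys if len(u) > len(v) and u.startswith(v)}
--
--
-- def generate_cn(c, n):
--     cn = set(c)
--     for _ in range(n):
--         cn = _dangling(c, cn) | _dangling(cn, c)
--     return cn
-- ===== Notes on version B (the rewrite author's own statement) =====
-- stated objective: simpler
-- what changed: Replaces A's top-down recursion with its four explicit nested add-loops by an iterative forward loop that, n times, rebuilds the set as the union of two set comprehensions over (codeword, current-set) pairs, using startswith instead of find()==0.
import Mathlib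
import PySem

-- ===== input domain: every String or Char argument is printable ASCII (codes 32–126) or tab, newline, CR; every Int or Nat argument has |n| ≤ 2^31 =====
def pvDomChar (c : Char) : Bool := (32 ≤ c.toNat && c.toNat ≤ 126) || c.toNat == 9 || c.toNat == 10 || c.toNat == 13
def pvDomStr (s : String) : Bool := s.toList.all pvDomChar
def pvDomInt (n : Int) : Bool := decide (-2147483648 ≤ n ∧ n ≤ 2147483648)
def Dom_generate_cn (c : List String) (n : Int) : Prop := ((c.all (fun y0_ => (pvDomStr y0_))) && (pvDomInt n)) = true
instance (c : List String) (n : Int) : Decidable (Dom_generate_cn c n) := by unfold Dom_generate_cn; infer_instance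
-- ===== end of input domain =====

-- B replaces A's top-down recursion (four nested add-loops) by an iterative forward loop
-- unioning two dangling-suffix set comprehensions per step; simpler, same cost.


-- ===== PORT A =====
-- A's recursion is on n; it only terminates for n ≥ 0 (Pre_), so the port recurses on
-- n.toNat (for n < 0, where Python A raises RecursionError, nothing is claimed).
def generateCnRec (c : List String) : Nat → List String
  | 0 => PySem.Set.ofList c
  | Nat.succ k =>
    let cn_minus_1 := generateCnRec c k
    -- cn = set(); first loop: for u in c, for v in cn_minus_1
    let cn : PySem.Set String :=
      c.foldl (fun cn u =>
        cn_minus_1.foldl (fun cn v =>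
          if PySem.Str.len u > PySem.Str.len v && PySem.Str.find u v == 0 then
            PySem.Set.add cn (PySem.Str.slice u (some (PySem.Str.len v)) none)
          else cn) cn) PySem.Set.empty
    -- second loop: for u in cn_minus_1, for v in c
    let cn : PySem.Set String :=
      cn_minus_1.foldl (fun cn u =>
        c.foldl (fun cn v =>
          if PySem.Str.len u > PySem.Str.len v && PySem.Str.find u v == 0 then
            PySem.Set.add cn (PySem.Str.slice u (some (PySem.Str.len v)) none)
          else cn) cn) cn
    cn

def generate_cn (c : List String) (n : Int) : List String := generateCnRec c n.toNat

-- ===== PORT B =====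
-- {u[len(v):] for u in xs for v in ys if len(u) > len(v) and u.startswith(v)}
def dangling (xs ys : List String) : PySem.Set String :=
  xs.foldl (fun acc u =>
    ys.foldl (fun acc v =>
      if PySem.Str.len u > PySem.Str.len v && PySem.Str.startswith u v then
        PySem.Set.add acc (PySem.Str.slice u (some (PySem.Str.len v)) none)
      else acc) acc) PySem.Set.empty

def generate_cn_alt (c : List String) (n : Int) : List String :=
  (PySem.List.pyRange 0 n).foldl
    (fun cn _ => PySem.Set.union (dangling c cn) (dangling cn c))
    (PySem.Set.ofList c)

-- ===== PRECONDITION & SPEC =====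
-- A's recursion on n terminates only for n ≥ 0; for n < 0 Python A raises RecursionError.
def Pre_generate_cn (c : List String) (n : Int) : Prop := 0 ≤ n
instance (c : List String) (n : Int) : Decidable (Pre_generate_cn c n) := by unfold Pre_generate_cn; infer_instance
def pvWitness_generate_cn : List String × Int := (["ab", "a", "b"], 2)

def Spec_generate_cn (c : List String) (n : Int) (out : List String) : Prop := out = generate_cn_alt c n
instance (c : List String) (n : Int) (out : List String) : Decidable (Spec_generate_cn c n out) := by unfold Spec_generate_cn; infer_instance

-- ===== CLAIM (what is proved, stated in full; the proofs are below) =====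
def Claim_equal_generate_cn : Prop := ∀ (c : List String) (n : Int), Dom_generate_cn c n → Pre_generate_cn c n → Spec_generate_cn c n (generate_cn c n)

-- ===== LEMMAS AND PROOFS =====

lemma union_add (a b : PySem.Set String) (x : String) :
    PySem.Set.union a (PySem.Set.add b x) = PySem.Set.add (PySem.Set.union a b) x := by
  unfold PySem.Set.add
  by_cases hx : b.contains x = true
  · simp only [hx, if_true]
    have hmem : x ∈ PySem.Set.union a b := by
      rw [PySem.Set.union]
      exact (PySem.Set.mem_update a b x).mpr (Or.inr ((PySem.Set.contains_iff b x).mp hx))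
    have : (PySem.Set.union a b).contains x = true := (PySem.Set.contains_iff _ x).mpr hmem
    rw [if_pos this]
  · simp only [hx]
    show PySem.Set.union a (b ++ [x]) = _
    unfold PySem.Set.union PySem.Set.update
    rw [List.foldl_append]
    rfl

lemma union_foldl_add (cs : List String) (a b : PySem.Set String) :
    PySem.Set.union a (cs.foldl PySem.Set.add b) = cs.foldl PySem.Set.add (PySem.Set.union a b) := by
  induction cs generalizing b with
  | nil => rfl
  | cons x t ih => simp only [List.foldl_cons]; rw [ih, union_add]

lemma union_assoc (a b cset : PySem.Set String) :
    PySem.Set.union (PySem.Set.union a b) cset = PySem.Set.union a (PySem.Set.union b cset) := by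
  show _ = PySem.Set.union a (cset.foldl PySem.Set.add b)
  rw [union_foldl_add]; rfl

lemma foldl_hoist {β : Type} (h : PySem.Set String → β → PySem.Set String)
    (hh : ∀ a b, h a b = PySem.Set.union a (h PySem.Set.empty b)) (l : List β) (acc : PySem.Set String) :
    l.foldl h acc = PySem.Set.union acc (l.foldl h PySem.Set.empty) := by
  induction l generalizing acc with
  | nil => rfl
  | cons b t ih =>
    simp only [List.foldl_cons]
    rw [ih (h acc b), ih (h PySem.Set.empty b), hh acc b, union_assoc]

lemma chars_find_eq_zero_iff_startswith (s sub : List Char) :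
    (PySem.Chars.find s sub == 0) = PySem.Chars.startswith s sub := by
  cases h : PySem.Chars.startswith s sub with
  | true =>
    have hpre : sub <+: s := (PySem.Chars.startswith_iff s sub).mp h
    have hinf : sub <:+: s := hpre.isInfix
    have hnn : 0 ≤ PySem.Chars.find s sub := (PySem.Chars.find_nonneg_iff s sub).mpr hinf
    have hspec := PySem.Chars.find_spec hnn
    have : PySem.Chars.find s sub = 0 := by
      by_contra hne
      have hpos : 0 < (PySem.Chars.find s sub).toNat := by omega
      exact hspec.2 0 hpos (by simpa using hpre)
    simp [this]
  | false =>
    have hnp : ¬ sub <+: s := fun hp => by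
      rw [(PySem.Chars.startswith_iff s sub).mpr hp] at h; exact Bool.noConfusion h
    have : PySem.Chars.find s sub ≠ 0 := by
      intro h0
      have hnn : 0 ≤ PySem.Chars.find s sub := by omega
      have hspec := PySem.Chars.find_spec hnn
      exact hnp (by simpa [h0] using hspec.1)
    simp [this]

lemma find_eq_zero_iff_startswith (u v : String) :
    (PySem.Str.find u v == 0) = PySem.Str.startswith u v := by
  have := chars_find_eq_zero_iff_startswith u.toList v.toList
  simpa using this

lemma inner_hoist (u : String) (ys : List String) (acc : PySem.Set String) :
    ys.foldl (fun a v =>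
      if PySem.Str.len u > PySem.Str.len v && PySem.Str.startswith u v then
        PySem.Set.add a (PySem.Str.slice u (some (PySem.Str.len v)) none)
      else a) acc
    = PySem.Set.union acc (ys.foldl (fun a v =>
      if PySem.Str.len u > PySem.Str.len v && PySem.Str.startswith u v then
        PySem.Set.add a (PySem.Str.slice u (some (PySem.Str.len v)) none)
      else a) PySem.Set.empty) := by
  apply foldl_hoist
  intro a v
  by_cases hc : (PySem.Str.len u > PySem.Str.len v && PySem.Str.startswith u v) = true
  · simp only [hc, if_true]; rw [union_add]; rfl
  · simp only [hc]; rfl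

lemma dangling_from (xs ys : List String) (acc : PySem.Set String) :
    xs.foldl (fun a u =>
      ys.foldl (fun a v =>
        if PySem.Str.len u > PySem.Str.len v && PySem.Str.startswith u v then
          PySem.Set.add a (PySem.Str.slice u (some (PySem.Str.len v)) none)
        else a) a) acc
    = PySem.Set.union acc (dangling xs ys) := by
  apply foldl_hoist
  intro a u
  exact inner_hoist u ys a

lemma stepA_eq (c s : List String) :
    (s.foldl (fun cn u =>
        c.foldl (fun cn v =>
          if PySem.Str.len u > PySem.Str.len v && PySem.Str.find u v == 0 then
            PySem.Set.add cn (PySem.Str.slice u (some (PySem.Str.len v)) none)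
          else cn) cn)
      (c.foldl (fun cn u =>
        s.foldl (fun cn v =>
          if PySem.Str.len u > PySem.Str.len v && PySem.Str.find u v == 0 then
            PySem.Set.add cn (PySem.Str.slice u (some (PySem.Str.len v)) none)
          else cn) cn) PySem.Set.empty))
    = PySem.Set.union (dangling c s) (dangling s c) := by
  simp only [find_eq_zero_iff_startswith]
  exact dangling_from s c (dangling c s)

lemma rec_succ (c : List String) (k : Nat) :
    generateCnRec c (k+1)
    = PySem.Set.union (dangling c (generateCnRec c k)) (dangling (generateCnRec c k) c) := by
  rw [generateCnRec]
  exact stepA_eq c (generateCnRec c k)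

lemma rec_eq_iter (c : List String) (k : Nat) :
    generateCnRec c k
    = (PySem.List.pyRange 0 (k : Int)).foldl
        (fun cn _ => PySem.Set.union (dangling c cn) (dangling cn c))
        (PySem.Set.ofList c) := by
  induction k with
  | zero => rfl
  | succ k ih =>
    have hcast : ((k + 1 : Nat) : Int) = (k : Int) + 1 := by push_cast; ring
    rw [hcast, PySem.List.pyRange_one_succ_right (by positivity), List.foldl_append]
    simp only [List.foldl_cons, List.foldl_nil]
    rw [← ih, rec_succ]

-- ===== VERDICT (by name: the statement is the Claim_ definition above) =====
theorem generate_cn_spec : Claim_equal_generate_cn := by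
  intro c n _ hn
  unfold Spec_generate_cn generate_cn generate_cn_alt
  rw [rec_eq_iter, Int.toNat_of_nonneg hn]
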